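-- pv_equiv track=rewrite | github.com/autumnloveless/battlesnakes | src/logic.py | _avoid_body
-- ===== SOURCE A (Python) =====
-- from typing import List, Dict
--
-- def _avoid_body(body: dict, my_head: dict, possible_moves: List[str]) -> List[str]:
--     """return: The list of remaining possible_moves, avoiding any snake bodies"""
--     for segment in body:
--       if ("left" in possible_moves) and (segment["x"] == my_head["x"]-1) and (segment["y"] == my_head["y"]):
--         possible_moves.remove("left")
--       elif ("right" in possible_moves) and (segment["x"] == my_head["x"]+1) and (segment["y"] == my_head["y"]):
--         possible_moves.remove("right")
--       elif ("down" in possible_moves) and (segment["y"] == my_head["y"]-1) and (segment["x"] == my_head["x"]):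
--         possible_moves.remove("down")
--       elif ("up" in possible_moves) and (segment["y"] == my_head["y"]+1) and (segment["x"] == my_head["x"]):
--         possible_moves.remove("up")
--     return possible_moves
-- ===== SOURCE B (Python) =====
-- from typing import List
--
--
-- def _avoid_body(body: dict, my_head: dict, possible_moves: List[str]) -> List[str]:
--     """return: The list of remaining possible_moves, avoiding any snake bodies"""
--     offsets = (("left", -1, 0), ("right", 1, 0), ("down", 0, -1), ("up", 0, 1))
--     if any(d in possible_moves for d, _, _ in offsets):
--         occupied = {(s["x"], s["y"]) for s in body}
--         hx, hy = my_head["x"], my_head["y"]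
--         for d, dx, dy in offsets:
--             if d in possible_moves and (hx + dx, hy + dy) in occupied:
--                 possible_moves.remove(d)
--     return possible_moves
-- ===== Notes on version B (the rewrite author's own statement) =====
-- stated objective: faster
-- what changed: Replaces the per-segment scan whose elif chain re-scans possible_moves for membership/removal at every segment by a precomputed set of occupied coordinates probed once for each of the four fixed head-adjacent directions.
-- outside the precondition, e.g. on _avoid_body([], {}, ['up']): A returns ['up'], B raises KeyError
import Mathlib
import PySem

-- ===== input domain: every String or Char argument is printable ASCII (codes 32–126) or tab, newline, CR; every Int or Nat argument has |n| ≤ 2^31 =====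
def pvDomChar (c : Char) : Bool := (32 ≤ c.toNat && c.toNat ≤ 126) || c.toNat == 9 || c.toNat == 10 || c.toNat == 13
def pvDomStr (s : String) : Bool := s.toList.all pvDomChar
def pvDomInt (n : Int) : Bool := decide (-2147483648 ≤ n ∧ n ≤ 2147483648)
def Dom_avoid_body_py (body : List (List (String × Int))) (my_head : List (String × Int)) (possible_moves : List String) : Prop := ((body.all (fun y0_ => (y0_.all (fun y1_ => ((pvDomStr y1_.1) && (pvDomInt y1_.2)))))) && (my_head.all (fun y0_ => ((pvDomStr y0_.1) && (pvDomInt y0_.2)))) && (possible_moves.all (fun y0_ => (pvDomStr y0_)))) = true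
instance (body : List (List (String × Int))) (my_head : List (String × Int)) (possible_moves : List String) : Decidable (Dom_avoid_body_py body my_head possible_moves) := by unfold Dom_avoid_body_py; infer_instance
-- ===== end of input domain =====

-- B replaces A's per-segment elif scan by a set of occupied coordinates probed once per direction;
-- the equivalence proved is about the RETURN value (both Pythons mutate possible_moves in place).

-- ===== PORT A =====
-- dict value lookup seg["x"]; total via getD 0 — Pre_ excludes the inputs where Python would raise KeyError
def pvVal (d : List (String × Int)) (k : String) : Int :=
  (PySem.Dict.get? (PySem.Dict.mk d) k).getD 0

-- the body of A's `for segment in body:` loop (the elif chain, branches in Python's order)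
def pvStepA (my_head : List (String × Int)) (pm : List String) (seg : List (String × Int)) : List String :=
  if "left" ∈ pm ∧ pvVal seg "x" = pvVal my_head "x" - 1 ∧ pvVal seg "y" = pvVal my_head "y" then
    (PySem.List.remove? pm "left").getD pm
  else if "right" ∈ pm ∧ pvVal seg "x" = pvVal my_head "x" + 1 ∧ pvVal seg "y" = pvVal my_head "y" then
    (PySem.List.remove? pm "right").getD pm
  else if "down" ∈ pm ∧ pvVal seg "y" = pvVal my_head "y" - 1 ∧ pvVal seg "x" = pvVal my_head "x" then
    (PySem.List.remove? pm "down").getD pm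
  else if "up" ∈ pm ∧ pvVal seg "y" = pvVal my_head "y" + 1 ∧ pvVal seg "x" = pvVal my_head "x" then
    (PySem.List.remove? pm "up").getD pm
  else pm

def avoid_body_py (body : List (List (String × Int))) (my_head : List (String × Int)) (possible_moves : List String) : List String :=
  body.foldl (pvStepA my_head) possible_moves

-- ===== PORT B =====
-- Source B's `offsets` tuple: each direction with its head-relative offset
def pvOffsets : List (String × Int × Int) :=
  [("left", -1, 0), ("right", 1, 0), ("down", 0, -1), ("up", 0, 1)]

def avoid_body_py_alt (body : List (List (String × Int))) (my_head : List (String × Int)) (possible_moves : List String) : List String :=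
  if pvOffsets.any (fun o => decide (o.1 ∈ possible_moves)) then
    let occupied : PySem.Set (Int × Int) :=
      PySem.Set.ofList (body.map (fun s => (pvVal s "x", pvVal s "y")))
    let hx := pvVal my_head "x"
    let hy := pvVal my_head "y"
    pvOffsets.foldl
      (fun pm o =>
        if o.1 ∈ pm ∧ PySem.Set.contains occupied (hx + o.2.1, hy + o.2.2) = true then
          (PySem.List.remove? pm o.1).getD pm
        else pm)
      possible_moves
  else possible_moves

-- ===== PRECONDITION & SPEC =====
-- Pre_ excludes (a) inputs whose segments/head lack an "x"/"y" key while a direction word is among the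
-- moves — there one of the Pythons raises KeyError (A may also still return, e.g. with empty body, while
-- B's upfront lookups raise) — and (b) possible_moves repeating a direction word, on which A's repeated
-- per-segment removal is an accident of its loop.
def Pre_avoid_body_py (body : List (List (String × Int))) (my_head : List (String × Int)) (possible_moves : List String) : Prop :=
  (("left" ∈ possible_moves ∨ "right" ∈ possible_moves ∨ "down" ∈ possible_moves ∨ "up" ∈ possible_moves) →
     ((∀ seg ∈ body, (PySem.Dict.get? (PySem.Dict.mk seg) "x").isSome ∧ (PySem.Dict.get? (PySem.Dict.mk seg) "y").isSome) ∧
      (PySem.Dict.get? (PySem.Dict.mk my_head) "x").isSome ∧ (PySem.Dict.get? (PySem.Dict.mk my_head) "y").isSome)) ∧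
  possible_moves.count "left" ≤ 1 ∧ possible_moves.count "right" ≤ 1 ∧
  possible_moves.count "down" ≤ 1 ∧ possible_moves.count "up" ≤ 1

instance (body : List (List (String × Int))) (my_head : List (String × Int)) (possible_moves : List String) : Decidable (Pre_avoid_body_py body my_head possible_moves) := by unfold Pre_avoid_body_py; infer_instance

def pvWitness_avoid_body_py : (List (List (String × Int))) × (List (String × Int)) × List String :=
  ([[("x", 0), ("y", 0)]], [("x", 1), ("y", 0)], ["left", "up"])

def Spec_avoid_body_py (body : List (List (String × Int))) (my_head : List (String × Int)) (possible_moves : List String) (out : List String) : Prop := out = avoid_body_py_alt body my_head possible_moves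
instance (body : List (List (String × Int))) (my_head : List (String × Int)) (possible_moves : List String) (out : List String) : Decidable (Spec_avoid_body_py body my_head possible_moves out) := by unfold Spec_avoid_body_py; infer_instance

-- ===== CLAIM (what is proved, stated in full; the proofs are below) =====
def Claim_equal_avoid_body_py : Prop := ∀ (body : List (List (String × Int))) (my_head : List (String × Int)) (possible_moves : List String), Dom_avoid_body_py body my_head possible_moves → Pre_avoid_body_py body my_head possible_moves → Spec_avoid_body_py body my_head possible_moves (avoid_body_py body my_head possible_moves)

-- ===== LEMMAS AND PROOFS =====

-- whether segment `seg` occupies the cell that move `m` would step onto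
def pvMatch (my_head seg : List (String × Int)) (m : String) : Bool :=
  (m == "left"  && pvVal seg "x" == pvVal my_head "x" - 1 && pvVal seg "y" == pvVal my_head "y") ||
  (m == "right" && pvVal seg "x" == pvVal my_head "x" + 1 && pvVal seg "y" == pvVal my_head "y") ||
  (m == "down"  && pvVal seg "y" == pvVal my_head "y" - 1 && pvVal seg "x" == pvVal my_head "x") ||
  (m == "up"    && pvVal seg "y" == pvVal my_head "y" + 1 && pvVal seg "x" == pvVal my_head "x")

theorem pv_erase_eq_filter (l : List String) (d : String) (h : l.count d ≤ 1) :
    l.erase d = l.filter (fun m => !(m == d)) := by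
  induction l with
  | nil => rfl
  | cons x t ih =>
    by_cases hx : x = d
    · subst hx
      simp [List.erase_cons_head, List.count_cons_self] at *
      have : t.count x = 0 := by omega
      have hnot : x ∉ t := by simpa [List.count_eq_zero] using this
      rw [List.filter_eq_self.2]
      intro a ha
      simp [show a ≠ x from fun e => hnot (e ▸ ha)]
    · rw [List.erase_cons_tail (by simpa using hx)]
      rw [ih (by simp [hx] at h ⊢; omega)]
      simp [hx]

-- a guarded `.remove` on a filtered list, when the list holds `d` at most once, is one more filter
theorem pv_removeGuard_filter (l : List String) (p : String → Bool) (d : String) (h : l.count d ≤ 1) :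
    (if d ∈ l.filter p then (PySem.List.remove? (l.filter p) d).getD (l.filter p) else l.filter p)
      = l.filter (fun m => p m && !(m == d)) := by
  by_cases hm : d ∈ l.filter p
  · rw [if_pos hm, PySem.List.remove?_eq_some_erase _ _ hm, Option.getD_some]
    have hc : (l.filter p).count d ≤ 1 :=
      le_trans (List.Sublist.count_le d List.filter_sublist) h
    rw [pv_erase_eq_filter _ _ hc, List.filter_filter]
    exact List.filter_congr fun a _ => Bool.and_comm _ _
  · rw [if_neg hm]
    symm
    apply List.filter_congr
    intro a ha
    by_cases hd : a = d
    · subst hd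
      have hp : p a = false := by
        by_contra hp
        exact hm (List.mem_filter.2 ⟨ha, by simpa using hp⟩)
      simp [hp]
    · simp [hd]

-- the same, with an extra pm-independent condition conjoined to the membership test
theorem pv_stepGuard_filter (l : List String) (p : String → Bool) (d : String) (c : Prop) [Decidable c]
    (h : l.count d ≤ 1) :
    (if d ∈ l.filter p ∧ c then (PySem.List.remove? (l.filter p) d).getD (l.filter p) else l.filter p)
      = l.filter (fun m => p m && !(decide c && (m == d))) := by
  by_cases hc : c
  · simp only [hc, and_true, decide_true, Bool.true_and]
    exact pv_removeGuard_filter l p d h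
  · rw [if_neg (by tauto)]
    simp [hc]

-- one iteration of A's loop on a filtered move list is one more filter
theorem pv_stepA_filter (my_head seg : List (String × Int)) (l : List String) (p : String → Bool)
    (hL : l.count "left" ≤ 1) (hR : l.count "right" ≤ 1) (hD : l.count "down" ≤ 1) (hU : l.count "up" ≤ 1) :
    pvStepA my_head (l.filter p) seg = l.filter (fun m => p m && !(pvMatch my_head seg m)) := by
  by_cases h1 : pvVal seg "x" = pvVal my_head "x" - 1 ∧ pvVal seg "y" = pvVal my_head "y"
  · have hstep : pvStepA my_head (l.filter p) seg =
        if "left" ∈ l.filter p then (PySem.List.remove? (l.filter p) "left").getD (l.filter p) else l.filter p := by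
      by_cases hmem : "left" ∈ l.filter p
      · rw [pvStepA, if_pos ⟨hmem, h1.1, h1.2⟩, if_pos hmem]
      · rw [pvStepA, if_neg (by tauto), if_neg (by rintro ⟨_, h, _⟩; omega),
            if_neg (by rintro ⟨_, h, _⟩; omega), if_neg (by rintro ⟨_, h, _⟩; omega), if_neg hmem]
    rw [hstep, pv_removeGuard_filter l p "left" hL]
    refine List.filter_congr fun a ha => ?_
    have hM : pvMatch my_head seg a = (a == "left") := by
      simp [pvMatch, h1.1, h1.2,
            beq_eq_false_iff_ne.mpr (show pvVal my_head "x" - 1 ≠ pvVal my_head "x" + 1 by omega),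
            beq_eq_false_iff_ne.mpr (show pvVal my_head "y" ≠ pvVal my_head "y" - 1 by omega),
            beq_eq_false_iff_ne.mpr (show pvVal my_head "y" ≠ pvVal my_head "y" + 1 by omega)]
    rw [hM]
  by_cases h2 : pvVal seg "x" = pvVal my_head "x" + 1 ∧ pvVal seg "y" = pvVal my_head "y"
  · have hstep : pvStepA my_head (l.filter p) seg =
        if "right" ∈ l.filter p then (PySem.List.remove? (l.filter p) "right").getD (l.filter p) else l.filter p := by
      by_cases hmem : "right" ∈ l.filter p
      · rw [pvStepA, if_neg (by rintro ⟨_, h, _⟩; omega), if_pos ⟨hmem, h2.1, h2.2⟩, if_pos hmem]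
      · rw [pvStepA, if_neg (by rintro ⟨_, h, _⟩; omega), if_neg (by tauto),
            if_neg (by rintro ⟨_, h, _⟩; omega), if_neg (by rintro ⟨_, h, _⟩; omega), if_neg hmem]
    rw [hstep, pv_removeGuard_filter l p "right" hR]
    refine List.filter_congr fun a ha => ?_
    have hM : pvMatch my_head seg a = (a == "right") := by
      simp [pvMatch, h2.1, h2.2,
            beq_eq_false_iff_ne.mpr (show pvVal my_head "x" + 1 ≠ pvVal my_head "x" - 1 by omega),
            beq_eq_false_iff_ne.mpr (show pvVal my_head "y" ≠ pvVal my_head "y" - 1 by omega),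
            beq_eq_false_iff_ne.mpr (show pvVal my_head "y" ≠ pvVal my_head "y" + 1 by omega)]
    rw [hM]
  by_cases h3 : pvVal seg "y" = pvVal my_head "y" - 1 ∧ pvVal seg "x" = pvVal my_head "x"
  · have hstep : pvStepA my_head (l.filter p) seg =
        if "down" ∈ l.filter p then (PySem.List.remove? (l.filter p) "down").getD (l.filter p) else l.filter p := by
      by_cases hmem : "down" ∈ l.filter p
      · rw [pvStepA, if_neg (by rintro ⟨_, _, h⟩; omega), if_neg (by rintro ⟨_, _, h⟩; omega),
            if_pos ⟨hmem, h3.1, h3.2⟩, if_pos hmem]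
      · rw [pvStepA, if_neg (by rintro ⟨_, _, h⟩; omega), if_neg (by rintro ⟨_, _, h⟩; omega),
            if_neg (by tauto), if_neg (by rintro ⟨_, h, _⟩; omega), if_neg hmem]
    rw [hstep, pv_removeGuard_filter l p "down" hD]
    refine List.filter_congr fun a ha => ?_
    have hM : pvMatch my_head seg a = (a == "down") := by
      simp [pvMatch, h3.1, h3.2,
            beq_eq_false_iff_ne.mpr (show pvVal my_head "x" ≠ pvVal my_head "x" - 1 by omega),
            beq_eq_false_iff_ne.mpr (show pvVal my_head "x" ≠ pvVal my_head "x" + 1 by omega),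
            beq_eq_false_iff_ne.mpr (show pvVal my_head "y" - 1 ≠ pvVal my_head "y" + 1 by omega)]
    rw [hM]
  by_cases h4 : pvVal seg "y" = pvVal my_head "y" + 1 ∧ pvVal seg "x" = pvVal my_head "x"
  · have hstep : pvStepA my_head (l.filter p) seg =
        if "up" ∈ l.filter p then (PySem.List.remove? (l.filter p) "up").getD (l.filter p) else l.filter p := by
      by_cases hmem : "up" ∈ l.filter p
      · rw [pvStepA, if_neg (by rintro ⟨_, _, h⟩; omega), if_neg (by rintro ⟨_, _, h⟩; omega),
            if_neg (by rintro ⟨_, h, _⟩; omega), if_pos ⟨hmem, h4.1, h4.2⟩, if_pos hmem]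
      · rw [pvStepA, if_neg (by rintro ⟨_, _, h⟩; omega), if_neg (by rintro ⟨_, _, h⟩; omega),
            if_neg (by rintro ⟨_, h, _⟩; omega), if_neg (by tauto), if_neg hmem]
    rw [hstep, pv_removeGuard_filter l p "up" hU]
    refine List.filter_congr fun a ha => ?_
    have hM : pvMatch my_head seg a = (a == "up") := by
      simp [pvMatch, h4.1, h4.2,
            beq_eq_false_iff_ne.mpr (show pvVal my_head "x" ≠ pvVal my_head "x" - 1 by omega),
            beq_eq_false_iff_ne.mpr (show pvVal my_head "x" ≠ pvVal my_head "x" + 1 by omega),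
            beq_eq_false_iff_ne.mpr (show pvVal my_head "y" + 1 ≠ pvVal my_head "y" - 1 by omega)]
    rw [hM]
  · -- no adjacent cell matches: the step is the identity and pvMatch is false everywhere
    have hstep : pvStepA my_head (l.filter p) seg = l.filter p := by
      rw [pvStepA, if_neg (by rintro ⟨_, a, b⟩; exact h1 ⟨a, b⟩),
          if_neg (by rintro ⟨_, a, b⟩; exact h2 ⟨a, b⟩),
          if_neg (by rintro ⟨_, a, b⟩; exact h3 ⟨a, b⟩),
          if_neg (by rintro ⟨_, a, b⟩; exact h4 ⟨a, b⟩)]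
    rw [hstep]
    refine List.filter_congr fun a ha => ?_
    have hM : pvMatch my_head seg a = false := by
      rw [Bool.eq_false_iff]
      intro hm
      simp only [pvMatch, Bool.or_eq_true, Bool.and_eq_true, beq_iff_eq] at hm
      rcases hm with ((⟨⟨_, hx⟩, hy⟩ | ⟨⟨_, hx⟩, hy⟩) | ⟨⟨_, hy⟩, hx⟩) | ⟨⟨_, hy⟩, hx⟩
      · exact h1 ⟨hx, hy⟩
      · exact h2 ⟨hx, hy⟩
      · exact h3 ⟨hy, hx⟩
      · exact h4 ⟨hy, hx⟩
    rw [hM]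
    simp

theorem pv_foldA_filter (body : List (List (String × Int))) (my_head : List (String × Int))
    (l : List String) (p : String → Bool)
    (hL : l.count "left" ≤ 1) (hR : l.count "right" ≤ 1) (hD : l.count "down" ≤ 1) (hU : l.count "up" ≤ 1) :
    body.foldl (pvStepA my_head) (l.filter p)
      = l.filter (fun m => p m && !(body.any (fun s => pvMatch my_head s m))) := by
  induction body generalizing p with
  | nil => simp
  | cons s rest ih =>
    rw [List.foldl_cons, pv_stepA_filter my_head s l p hL hR hD hU,
        ih (fun m => p m && !(pvMatch my_head s m))]
    refine List.filter_congr fun a ha => ?_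
    simp [List.any_cons, Bool.and_assoc]

theorem pv_foldB_filter (l : List String) (hx hy : Int) (occ : PySem.Set (Int × Int))
    (hL : l.count "left" ≤ 1) (hR : l.count "right" ≤ 1) (hD : l.count "down" ≤ 1) (hU : l.count "up" ≤ 1) :
    pvOffsets.foldl
      (fun pm o =>
        if o.1 ∈ pm ∧ PySem.Set.contains occ (hx + o.2.1, hy + o.2.2) = true then
          (PySem.List.remove? pm o.1).getD pm
        else pm) l
    = l.filter (fun m =>
        !(PySem.Set.contains occ (hx - 1, hy) && (m == "left")) &&
        !(PySem.Set.contains occ (hx + 1, hy) && (m == "right")) &&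
        !(PySem.Set.contains occ (hx, hy - 1) && (m == "down")) &&
        !(PySem.Set.contains occ (hx, hy + 1) && (m == "up"))) := by
  simp only [pvOffsets, List.foldl_cons, List.foldl_nil]
  have s1 := pv_stepGuard_filter l (fun _ => true) "left"
      (PySem.Set.contains occ (hx + -1, hy + 0) = true) hL
  rw [List.filter_true] at s1
  rw [s1]
  rw [pv_stepGuard_filter l _ "right" (PySem.Set.contains occ (hx + 1, hy + 0) = true) hR]
  rw [pv_stepGuard_filter l _ "down" (PySem.Set.contains occ (hx + 0, hy + -1) = true) hD]
  rw [pv_stepGuard_filter l _ "up" (PySem.Set.contains occ (hx + 0, hy + 1) = true) hU]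
  refine List.filter_congr fun m hm => ?_
  simp [Bool.and_assoc, ← sub_eq_add_neg]

-- ===== VERDICT (by name: the statement is the Claim_ definition above) =====
theorem avoid_body_py_spec : Claim_equal_avoid_body_py := by
  intro body my_head moves _ hPre
  obtain ⟨hkeys, hL, hR, hD, hU⟩ := hPre
  show avoid_body_py body my_head moves = avoid_body_py_alt body my_head moves
  have hA : avoid_body_py body my_head moves
      = moves.filter (fun m => !(body.any (fun s => pvMatch my_head s m))) := by
    have := pv_foldA_filter body my_head moves (fun _ => true) hL hR hD hU
    simpa [avoid_body_py] using this
  by_cases hguard : pvOffsets.any (fun o => decide (o.1 ∈ moves)) = true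
  · rw [hA]
    simp only [avoid_body_py_alt, hguard, if_true]
    rw [pv_foldB_filter moves (pvVal my_head "x") (pvVal my_head "y") _ hL hR hD hU]
    refine List.filter_congr fun m hm => ?_
    rw [Bool.eq_iff_iff]
    simp [pvMatch, PySem.Set.mem_ofList, List.mem_map]
    by_cases m1 : m = "left" <;> by_cases m2 : m = "right" <;> by_cases m3 : m = "down" <;>
      by_cases m4 : m = "up" <;> simp_all <;> tauto
  · -- no direction word occurs in the moves: both sides return the list unchanged
    rw [avoid_body_py_alt, if_neg hguard, hA]
    have hnone : ∀ d ∈ (["left", "right", "down", "up"] : List String), d ∉ moves := by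
      simpa [pvOffsets] using hguard
    apply List.filter_eq_self.2
    intro a ha
    have : ∀ d ∈ (["left", "right", "down", "up"] : List String), a ≠ d :=
      fun d hd e => hnone d hd (e ▸ ha)
    simp [pvMatch,
          beq_eq_false_iff_ne.mpr (this "left" (by simp)),
          beq_eq_false_iff_ne.mpr (this "right" (by simp)),
          beq_eq_false_iff_ne.mpr (this "down" (by simp)),
          beq_eq_false_iff_ne.mpr (this "up" (by simp))]
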